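-- pv_equiv track=rewrite | github.com/megansam5/AdventOfCode | 2015/day-3/main.py | create_dict_of_coordinates
-- ===== SOURCE A (Python) =====
-- def create_dict_of_coordinates(positions: str) -> dict:
--     """Creates a dictionary of coordinates visited."""
--     x = 0
--     y = 0
--     result = {'0,0': 1}
--     for direction in positions:
--         if direction == '^':
--             y += 1
--         elif direction == '>':
--             x += 1
--         elif direction == '<':
--             x -= 1
--         else:
--             y -= 1
--         location = f'{x},{y}'
--         if location in result:
--             result[location] += 1
--         else:
--             result[location] = 1
--     return result
-- ===== SOURCE B (Python) =====
-- def create_dict_of_coordinates(positions: str) -> dict: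
--     """Creates a dictionary of coordinates visited.
--
--     Generate-then-tally: first build the full list of visited location keys
--     (deltas taken from lookup tables), then count them in a second pass.
--     """
--     dx = {'^': 0, '>': 1, '<': -1}
--     dy = {'^': 1, '>': 0, '<': 0}
--     keys = ['0,0']
--     x = 0
--     y = 0
--     for c in positions:
--         x += dx.get(c, 0)
--         y += dy.get(c, -1)
--         keys.append(f'{x},{y}')
--     result = {}
--     for k in keys:
--         result[k] = result.get(k, 0) + 1
--     return result
-- ===== Notes on version B (the rewrite author's own statement) =====
-- stated objective: alternative
-- what changed: Replaces A's single compute-and-count loop with a generate-then-tally decomposition: one pass maps chars to deltas via lookup tables and emits the list of visited location keys (seeded with '0,0'), a second pass counts that list into a dict.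
import Mathlib
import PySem

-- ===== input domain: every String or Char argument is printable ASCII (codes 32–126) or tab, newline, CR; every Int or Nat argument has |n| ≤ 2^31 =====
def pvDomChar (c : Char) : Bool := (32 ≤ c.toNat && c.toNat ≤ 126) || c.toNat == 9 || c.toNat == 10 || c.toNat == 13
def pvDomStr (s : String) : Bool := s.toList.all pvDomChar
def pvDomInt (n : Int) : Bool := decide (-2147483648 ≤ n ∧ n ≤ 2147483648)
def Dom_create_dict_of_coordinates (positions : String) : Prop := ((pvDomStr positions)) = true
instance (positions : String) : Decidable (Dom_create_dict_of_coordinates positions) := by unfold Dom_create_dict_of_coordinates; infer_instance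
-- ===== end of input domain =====

-- B replaces A's inline compute-and-count loop by generate-then-tally (same O(n) cost); return value only.

-- f'{x},{y}'  (both Pythons format the location key identically)
def pyLoc (x y : Int) : String := PySem.Int.toStr x ++ "," ++ PySem.Int.toStr y

-- ===== PORT A =====
-- A's loop: running (x, y) plus the dict, updated in place per character
def aLoop : Int → Int → PySem.Dict String Int → List Char → PySem.Dict String Int
  | _, _, d, [] => d
  | x, y, d, c :: cs =>
    let x' := if c = '^' then x else if c = '>' then x + 1 else if c = '<' then x - 1 else x
    let y' := if c = '^' then y + 1 else if c = '>' then y else if c = '<' then y else y - 1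
    let loc := pyLoc x' y'
    let d' := if d.contains loc then d.insert loc (d.getD loc 0 + 1) else d.insert loc 1
    aLoop x' y' d' cs

def create_dict_of_coordinates (positions : String) : List (String × Int) :=
  (aLoop 0 0 (PySem.Dict.ofList [("0,0", 1)]) positions.toList).items

-- ===== PORT B =====
def dxDict : PySem.Dict Char Int := PySem.Dict.ofList [('^', 0), ('>', 1), ('<', -1)]
def dyDict : PySem.Dict Char Int := PySem.Dict.ofList [('^', 1), ('>', 0), ('<', 0)]

-- B's first pass: the list of visited location keys (after the seed)
def bKeys : Int → Int → List Char → List String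
  | _, _, [] => []
  | x, y, c :: cs =>
    let x' := x + dxDict.getD c 0
    let y' := y + dyDict.getD c (-1)
    pyLoc x' y' :: bKeys x' y' cs

def create_dict_of_coordinates_alt (positions : String) : List (String × Int) :=
  let keys := "0,0" :: bKeys 0 0 positions.toList
  (keys.foldl (fun d k => d.insert k (d.getD k 0 + 1)) PySem.Dict.empty).items

-- ===== PRECONDITION & SPEC =====
def Spec_create_dict_of_coordinates (positions : String) (out : List (String × Int)) : Prop := out = create_dict_of_coordinates_alt positions
instance (positions : String) (out : List (String × Int)) : Decidable (Spec_create_dict_of_coordinates positions out) := by unfold Spec_create_dict_of_coordinates; infer_instance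

-- ===== CLAIM (what is proved, stated in full; the proofs are below) =====
def Claim_equal_create_dict_of_coordinates : Prop := ∀ (positions : String), Dom_create_dict_of_coordinates positions → Spec_create_dict_of_coordinates positions (create_dict_of_coordinates positions)

-- ===== LEMMAS AND PROOFS =====

-- B's table lookups compute exactly A's branch deltas
lemma dx_eq (c : Char) :
    dxDict.getD c 0 = (if c = '^' then 0 else if c = '>' then 1 else if c = '<' then -1 else 0) := by
  by_cases h1 : c = '^'
  · subst h1; decide
  by_cases h2 : c = '>'
  · subst h2; decide
  by_cases h3 : c = '<'
  · subst h3; decide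
  have hmk : dxDict = PySem.Dict.mk [('^', 0), ('>', 1), ('<', -1)] := rfl
  rw [hmk, if_neg h1, if_neg h2, if_neg h3]
  simp [PySem.Dict.getD_eq_get?_getD, PySem.Dict.get?, Ne.symm h1, Ne.symm h2, Ne.symm h3]

lemma dy_eq (c : Char) :
    dyDict.getD c (-1) = (if c = '^' then 1 else if c = '>' then 0 else if c = '<' then 0 else -1) := by
  by_cases h1 : c = '^'
  · subst h1; decide
  by_cases h2 : c = '>'
  · subst h2; decide
  by_cases h3 : c = '<'
  · subst h3; decide
  have hmk : dyDict = PySem.Dict.mk [('^', 1), ('>', 0), ('<', 0)] := rfl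
  rw [hmk, if_neg h1, if_neg h2, if_neg h3]
  simp [PySem.Dict.getD_eq_get?_getD, PySem.Dict.get?, Ne.symm h1, Ne.symm h2, Ne.symm h3]

-- A's in-place counting loop equals folding B's tally step over B's generated key list
lemma aLoop_eq_fold (cs : List Char) : ∀ (x y : Int) (d : PySem.Dict String Int),
    aLoop x y d cs = (bKeys x y cs).foldl (fun d k => d.insert k (d.getD k 0 + 1)) d := by
  induction cs with
  | nil => intro x y d; rfl
  | cons c cs ih =>
    intro x y d
    have hx : x + dxDict.getD c 0
        = (if c = '^' then x else if c = '>' then x + 1 else if c = '<' then x - 1 else x) := by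
      rw [dx_eq]; split_ifs <;> ring
    have hy : y + dyDict.getD c (-1)
        = (if c = '^' then y + 1 else if c = '>' then y else if c = '<' then y else y - 1) := by
      rw [dy_eq]; split_ifs <;> ring
    simp only [aLoop, bKeys, List.foldl_cons, hx, hy, ih]
    congr 1
    by_cases hc : PySem.Dict.contains d (pyLoc (if c = '^' then x else if c = '>' then x + 1 else if c = '<' then x - 1 else x) (if c = '^' then y + 1 else if c = '>' then y else if c = '<' then y else y - 1))
    · simp [hc]
    · simp [hc, PySem.Dict.getD_of_not_contains]

-- ===== VERDICT (by name: the statement is the Claim_ definition above) =====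
theorem create_dict_of_coordinates_spec : Claim_equal_create_dict_of_coordinates := by
  intro positions _
  unfold Spec_create_dict_of_coordinates create_dict_of_coordinates create_dict_of_coordinates_alt
  simp only [List.foldl_cons]
  rw [aLoop_eq_fold]
  rfl
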